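-- pv_equiv track=rewrite | github.com/Meisterschueler/Codewars | python/kyu_1/become_immortal.py | solve
-- ===== SOURCE A (Python) =====
-- import math
--
-- def rowsum(n, multiple, loss):
--     if n == 1:
--         return max(0, n - 1 + multiple - loss)
--
--     num_max = max(0, n + (n * multiple) - 1 - loss)
--     num_min = max(0, num_max - n)
--
--     sum_0_to_num_max = (num_max * (num_max + 1)) // 2
--     sum_0_to_num_min = (num_min * (num_min + 1)) // 2
--
--     return sum_0_to_num_max - sum_0_to_num_min
--
-- def solve(m, n, l):
--     (m, n) = (m, n) if m <= n else (n, m)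
--     if m == 0:
--         return 0
--
--     min_pow_2 = 2 ** int(math.log2(m))
--     max_pow_2 = 2 ** int(math.log2(n))
--     max_width = (n // min_pow_2) * min_pow_2
--
--     # calculate upper left rectangle
--     rowsum_ul = rowsum(max_width, multiple=0, loss=l)
--     rectangle_ul = min_pow_2 * rowsum_ul
--
--     # calculate upper right rectangle
--     rowsum_ur = rowsum(min_pow_2, multiple=(n // min_pow_2), loss=l)
--     rectangle_ur = (n - max_width) * rowsum_ur
--
--     if m > min_pow_2:
--         # calculate lower left rectangle
--         if (max_width // min_pow_2) % 2 == 0: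
--             rowsum_ll = rowsum(max_width, multiple=0, loss=l)
--         else:
--             rowsum_ll = rowsum(max_width - min_pow_2, multiple=0, loss=l)
--             rowsum_ll += rowsum(min_pow_2, multiple=(max_width // min_pow_2), loss=l)
--         rectangle_ll = (m - min_pow_2) * rowsum_ll
--
--         # calculate lower right rectangle
--         factor = (max_width // min_pow_2)
--         factor = factor + 1 if factor % 2 == 0 else factor - 1
--         offset = min_pow_2 * factor
--         rectangle_lr = solve(m - min_pow_2, n - max_width, l=l-offset)
--     else:
--         rectangle_ll = 0
--         rectangle_lr = 0
--
--     return rectangle_ul + rectangle_ur + rectangle_ll + rectangle_lr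
-- ===== SOURCE B (Python) =====
-- def _clampsum(K, l):
--     # sum of max(0, v - l) for v in range(K)
--     if l >= K:
--         return 0
--     if l < 0:
--         return K * (K - 1) // 2 - K * l
--     d = K - 1 - l
--     return d * (d + 1) // 2
--
-- def solve(m, n, l):
--     # quadrant divide-and-conquer on the largest power of two K <= max(m, n)
--     if m <= 0 or n <= 0:
--         return 0
--     K = 1 << (max(m, n).bit_length() - 1)
--     m1, n1 = min(m, K), min(n, K)
--     m2, n2 = m - m1, n - n1
--     total = (m1 * n1 // K) * _clampsum(K, l)
--     total += solve(m1, n2, l - K)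
--     total += solve(m2, n1, l - K)
--     total += solve(m2, n2, l)
--     return total
-- ===== Notes on version B (the rewrite author's own statement) =====
-- stated objective: alternative
-- what changed: Replaced A's swap-normalized rowsum/parity rectangle decomposition (upper-left/upper-right/lower-left strips with a parity-corrected offset recursion) by a symmetric quadrant divide-and-conquer at the largest power of two K <= max(m,n): one closed-form clamped triangular sum for the K-aligned block plus three direct recursive quadrant calls, with no m<=n swap, no rowsum helper and no parity case analysis.
import Mathlib
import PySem

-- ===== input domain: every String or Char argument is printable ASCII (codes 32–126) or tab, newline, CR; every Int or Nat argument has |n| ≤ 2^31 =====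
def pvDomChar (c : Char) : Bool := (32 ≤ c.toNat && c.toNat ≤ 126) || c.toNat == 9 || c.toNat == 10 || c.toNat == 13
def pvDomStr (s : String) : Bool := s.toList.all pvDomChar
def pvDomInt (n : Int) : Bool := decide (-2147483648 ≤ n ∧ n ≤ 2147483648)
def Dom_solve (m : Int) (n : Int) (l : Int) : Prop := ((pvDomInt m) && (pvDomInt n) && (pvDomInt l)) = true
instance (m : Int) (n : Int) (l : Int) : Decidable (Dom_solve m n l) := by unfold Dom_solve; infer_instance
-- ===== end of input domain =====

-- B replaces A's swap-normalized rowsum/parity rectangle decomposition by a symmetric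
-- quadrant divide-and-conquer at the largest power of two ≤ max(m,n) (alternative
-- decomposition, same asymptotic cost).

-- ===== PORT A =====

def rowsumA (n mult loss : Int) : Int :=
  if n = 1 then max 0 (n - 1 + mult - loss)
  else
    let numMax := max 0 (n + n * mult - 1 - loss)
    let numMin := max 0 (numMax - n)
    PySem.Int.floordiv (numMax * (numMax + 1)) 2 - PySem.Int.floordiv (numMin * (numMin + 1)) 2

-- fuel = (m+n).toNat + 1 makes the Python recursion (which always shrinks m+n) structural;
-- the `m ≤ 0` branch merges Python's `m == 0` return with a totality guard for m < 0
-- (where Python raises, outside Pre_solve).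
def auxA : Nat → Int → Int → Int → Int
  | 0, _, _, _ => 0
  | fuel+1, m0, n0, l =>
    let m := if m0 ≤ n0 then m0 else n0
    let n := if m0 ≤ n0 then n0 else m0
    if m ≤ 0 then 0
    else
      let minPow2 : Int := 2 ^ Nat.log2 m.toNat
      let maxWidth := PySem.Int.floordiv n minPow2 * minPow2
      let rectUl := minPow2 * rowsumA maxWidth 0 l
      let rectUr := (n - maxWidth) * rowsumA minPow2 (PySem.Int.floordiv n minPow2) l
      if minPow2 < m then
        let rowsumLl :=
          if PySem.Int.mod (PySem.Int.floordiv maxWidth minPow2) 2 = 0 then rowsumA maxWidth 0 l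
          else rowsumA (maxWidth - minPow2) 0 l +
               rowsumA minPow2 (PySem.Int.floordiv maxWidth minPow2) l
        let rectLl := (m - minPow2) * rowsumLl
        let factor0 := PySem.Int.floordiv maxWidth minPow2
        let factor := if PySem.Int.mod factor0 2 = 0 then factor0 + 1 else factor0 - 1
        let rectLr := auxA fuel (m - minPow2) (n - maxWidth) (l - minPow2 * factor)
        rectUl + rectUr + rectLl + rectLr
      else rectUl + rectUr

def solve (m : Int) (n : Int) (l : Int) : Int := auxA ((m + n).toNat + 1) m n l

-- ===== PORT B =====

def clampsumB (K l : Int) : Int :=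
  if K ≤ l then 0
  else if l < 0 then PySem.Int.floordiv (K * (K - 1)) 2 - K * l
  else
    let d := K - 1 - l
    PySem.Int.floordiv (d * (d + 1)) 2

def auxB : Nat → Int → Int → Int → Int
  | 0, _, _, _ => 0
  | fuel+1, m, n, l =>
    if m ≤ 0 ∨ n ≤ 0 then 0
    else
      let K : Int := 1 <<< (PySem.Int.bitLength (max m n) - 1)
      let m1 := min m K
      let n1 := min n K
      let m2 := m - m1
      let n2 := n - n1
      PySem.Int.floordiv (m1 * n1) K * clampsumB K l
        + auxB fuel m1 n2 (l - K) + auxB fuel m2 n1 (l - K) + auxB fuel m2 n2 l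

def solve_alt (m : Int) (n : Int) (l : Int) : Int := auxB ((m + n).toNat + 1) m n l

-- ===== PRECONDITION & SPEC =====

-- Pre_solve excludes exactly the inputs where A raises: with m < 0 or n < 0 the swapped
-- smaller side is negative and math.log2 raises ValueError there (B returns 0 on those).
def Pre_solve (m : Int) (n : Int) (l : Int) : Prop := 0 ≤ m ∧ 0 ≤ n
instance (m : Int) (n : Int) (l : Int) : Decidable (Pre_solve m n l) := by
  unfold Pre_solve; infer_instance

def pvWitness_solve : Int × Int × Int := (3, 5, 2)

def Spec_solve (m : Int) (n : Int) (l : Int) (out : Int) : Prop := out = solve_alt m n l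
instance (m : Int) (n : Int) (l : Int) (out : Int) : Decidable (Spec_solve m n l out) := by
  unfold Spec_solve; infer_instance

-- ===== CLAIM (what is proved, stated in full; the proofs are below) =====
def Claim_equal_solve : Prop :=
  ∀ (m : Int) (n : Int) (l : Int), Dom_solve m n l → Pre_solve m n l →
    Spec_solve m n l (solve m n l)

-- ===== LEMMAS AND PROOFS =====

-- the common mathematical value: sum of max(0, (i XOR j) - l) over the m × n grid
def S (a b : Nat) (l : Int) : Int :=
  ∑ i ∈ Finset.range a, ∑ j ∈ Finset.range b, max 0 (((i ^^^ j : Nat) : Int) - l)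

def G (N : Nat) (c : Int) : Int := ∑ v ∈ Finset.range N, max 0 ((v : Int) - c)

def tri (x : Int) : Int := x * (x + 1) / 2

lemma two_mul_tri (x : Int) : 2 * tri x = x * (x + 1) := by
  unfold tri
  exact Int.mul_ediv_cancel' ((Int.even_mul_succ_self x).two_dvd)

lemma tri_step (x : Int) (hx : 0 < x) :
    tri (max 0 x) = tri (max 0 (x - 1)) + max 0 x := by
  have a1 : max 0 x = x := by omega
  have a2 : max 0 (x - 1) = x - 1 := by omega
  rw [a1, a2]
  have key : 2 * tri x = 2 * tri (x - 1) + 2 * x := by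
    linear_combination two_mul_tri x - two_mul_tri (x - 1)
  omega

lemma G_closed (N : Nat) (c : Int) :
    G N c = tri (max 0 ((N : Int) - 1 - c)) - tri (max 0 (-1 - c)) := by
  induction N with
  | zero => simp [G, tri]
  | succ N ih =>
    rw [G, Finset.sum_range_succ, ← G, ih]
    have hx0 : ((N + 1 : Nat) : Int) - 1 - c = (N : Int) - c := by push_cast; ring
    rw [hx0]
    by_cases hx : (N : Int) - c ≤ 0
    · have a1 : max 0 ((N : Int) - c) = 0 := by omega
      have a2 : max 0 ((N : Int) - 1 - c) = 0 := by omega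
      rw [a1, a2]
      omega
    · push_neg at hx
      have := tri_step ((N : Int) - c) hx
      have e : (N : Int) - c - 1 = (N : Int) - 1 - c := by ring
      rw [e] at this
      rw [this]
      ring

lemma rowsum_eq (n mult loss : Int) (hn : 0 ≤ n) :
    rowsumA n mult loss = G n.toNat (loss - n * mult) := by
  have hcast : ((n.toNat : Int)) = n := Int.toNat_of_nonneg hn
  rw [G_closed, hcast]
  simp only [rowsumA]
  have h2 : (0:Int) < 2 := by norm_num
  by_cases h1 : n = 1
  · rw [if_pos h1]
    subst h1
    have e1 : max 0 ((1:Int) - 1 - (loss - 1 * mult)) = max 0 (mult - loss) := by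
      congr 1; ring
    have e2 : max 0 (-1 - (loss - 1 * mult)) = max 0 (mult - loss - 1) := by
      congr 1; ring
    rw [e1, e2]
    by_cases h : mult - loss ≤ 0
    · have a1 : max 0 (mult - loss) = 0 := by omega
      have a2 : max 0 (mult - loss - 1) = 0 := by omega
      have a3 : max 0 (1 - 1 + mult - loss) = 0 := by omega
      rw [a1, a2, a3]
      simp
    · push_neg at h
      have := tri_step (mult - loss) h
      have a3 : max 0 (1 - 1 + mult - loss) = max 0 (mult - loss) := by omega
      rw [a3, this]
      have a1 : max 0 (mult - loss) = mult - loss := by omega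
      rw [a1]
      ring
  · rw [if_neg h1]
    rw [PySem.Int.floordiv_eq_ediv_of_pos h2, PySem.Int.floordiv_eq_ediv_of_pos h2]
    have e1 : n + n * mult - 1 - loss = n - 1 - (loss - n * mult) := by ring
    rw [e1]
    have e2 : max 0 (max 0 (n - 1 - (loss - n * mult)) - n) = max 0 (-1 - (loss - n * mult)) := by
      by_cases h : n - 1 - (loss - n * mult) ≤ 0
      · have a1 : max 0 (n - 1 - (loss - n * mult)) = 0 := by omega
        rw [a1]
        omega
      · have a1 : max 0 (n - 1 - (loss - n * mult)) = n - 1 - (loss - n * mult) := by omega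
        rw [a1]
        omega
    rw [e2]
    rfl

lemma clampsum_eq (K l : Int) (hK : 0 < K) : clampsumB K l = G K.toNat l := by
  have hcast : ((K.toNat : Int)) = K := Int.toNat_of_nonneg (le_of_lt hK)
  rw [G_closed, hcast]
  simp only [clampsumB]
  have h2 : (0:Int) < 2 := by norm_num
  by_cases hKl : K ≤ l
  · rw [if_pos hKl]
    have a1 : max 0 (K - 1 - l) = 0 := by omega
    have a2 : max 0 (-1 - l) = 0 := by omega
    rw [a1, a2]
    simp
  · rw [if_neg hKl]
    by_cases hl : l < 0
    · rw [if_pos hl, PySem.Int.floordiv_eq_ediv_of_pos h2]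
      have a1 : max 0 (K - 1 - l) = K - 1 - l := by omega
      have a2 : max 0 (-1 - l) = -1 - l := by omega
      rw [a1, a2]
      have t1 := two_mul_tri (K - 1 - l)
      have t2 := two_mul_tri (-1 - l)
      have t3 := two_mul_tri (K - 1)
      have key : 2 * (K * (K - 1) / 2 - K * l) = 2 * (tri (K - 1 - l) - tri (-1 - l)) := by
        have e : K * (K - 1) / 2 = tri (K - 1) := by
          unfold tri
          congr 1
          ring
        rw [e]
        linear_combination t3 - t1 + t2
      omega
    · rw [if_neg hl, PySem.Int.floordiv_eq_ediv_of_pos h2]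
      have a1 : max 0 (K - 1 - l) = K - 1 - l := by omega
      have a2 : max 0 (-1 - l) = 0 := by omega
      rw [a1, a2]
      show (K - 1 - l) * (K - 1 - l + 1) / 2 = tri (K - 1 - l) - tri 0
      simp [tri]

-- ---- xor machinery ----

lemma xor_block (e a b c d : Nat) (hb : b < 2^e) (hd : d < 2^e) :
    (2^e * a + b) ^^^ (2^e * c + d) = 2^e * (a ^^^ c) + (b ^^^ d) := by
  apply Nat.eq_of_testBit_eq
  intro j
  rw [Nat.testBit_xor, Nat.testBit_two_pow_mul_add a hb, Nat.testBit_two_pow_mul_add c hd,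
      Nat.testBit_two_pow_mul_add (a ^^^ c) (Nat.xor_lt_two_pow hb hd)]
  by_cases h : j < e <;> simp [h, Nat.testBit_xor]

lemma sum_xor (e i : Nat) (hi : i < 2^e) (f : Nat → Int) :
    ∑ r ∈ Finset.range (2^e), f (i ^^^ r) = ∑ r ∈ Finset.range (2^e), f r := by
  apply Finset.sum_nbij' (i := fun r => i ^^^ r) (j := fun r => i ^^^ r)
  · intro a ha
    rw [Finset.mem_range] at *
    exact Nat.xor_lt_two_pow hi ha
  · intro a ha
    rw [Finset.mem_range] at *
    exact Nat.xor_lt_two_pow hi ha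
  · intro a _
    simp
  · intro a _
    simp
  · intro a _
    rfl

lemma sum_range_mul (k t : Nat) (f : Nat → Int) :
    ∑ j ∈ Finset.range (k * t), f j =
      ∑ q ∈ Finset.range t, ∑ r ∈ Finset.range k, f (k * q + r) := by
  induction t with
  | zero => simp
  | succ t ih =>
    rw [Nat.mul_succ, Finset.sum_range_add, ih, Finset.sum_range_succ]

lemma row_block (e t i : Nat) (hi : i < 2^e) (f : Nat → Int) :
    ∑ j ∈ Finset.range (2^e * t), f (i ^^^ j) = ∑ j ∈ Finset.range (2^e * t), f j := by
  rw [sum_range_mul, sum_range_mul]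
  apply Finset.sum_congr rfl
  intro q _
  have cell : ∀ r ∈ Finset.range (2^e), f (i ^^^ (2^e * q + r)) =
      (fun v => f (2^e * q + v)) (i ^^^ r) := by
    intro r hr
    have hr' := Finset.mem_range.mp hr
    have h := xor_block e 0 i q r hi hr'
    simp only [Nat.mul_zero, Nat.zero_add, Nat.zero_xor] at h
    simp only [h]
  rw [Finset.sum_congr rfl cell, sum_xor e i hi (fun v => f (2^e * q + v))]

lemma xor_one (q : Nat) : 1 ^^^ q = if q % 2 = 0 then q + 1 else q - 1 := by
  have h := xor_block 1 0 1 (q / 2) (q % 2) (by rw [pow_one]; norm_num) (by rw [pow_one]; omega)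
  simp only [pow_one, Nat.mul_zero, Nat.zero_add, Nat.zero_xor] at h
  have e : 2 * (q / 2) + q % 2 = q := by omega
  rw [e] at h
  have h01 : q % 2 = 0 ∨ q % 2 = 1 := by omega
  rcases h01 with h01 | h01
  · rw [h01] at h
    simp only [Nat.xor_zero] at h
    rw [if_pos h01, h]
    omega
  · rw [h01] at h
    have e1 : (1 : Nat) ^^^ 1 = 0 := by decide
    rw [e1] at h
    rw [if_neg (by omega), h]
    omega

lemma sum_xor_one (h : Nat → Int) (t : Nat) :
    ∑ q ∈ Finset.range t, h (1 ^^^ q) =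
      if t % 2 = 0 then ∑ q ∈ Finset.range t, h q
      else (∑ q ∈ Finset.range (t - 1), h q) + h t := by
  induction t using Nat.strong_induction_on with
  | _ t ih =>
    rcases t with _ | t
    · simp
    rcases t with _ | t
    · simp [Finset.sum_range_one, xor_one]
    · have iht := ih t (by omega)
      rw [Finset.sum_range_succ, Finset.sum_range_succ, iht]
      by_cases hp : t % 2 = 0
      · obtain ⟨u, rfl⟩ : ∃ u, t = 2*u := ⟨t/2, by omega⟩
        rw [if_pos hp, if_pos (by omega : (2*u+1+1) % 2 = 0)]
        rw [xor_one (2*u), xor_one (2*u+1), if_pos (by omega), if_neg (by omega)]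
        rw [show 2*u+1-1 = 2*u from by omega]
        rw [Finset.sum_range_succ, Finset.sum_range_succ]
        ring
      · obtain ⟨u, rfl⟩ : ∃ u, t = 2*u+1 := ⟨t/2, by omega⟩
        rw [if_neg hp, if_neg (by omega : ¬ (2*u+1+1+1) % 2 = 0)]
        rw [xor_one (2*u+1), xor_one (2*u+1+1), if_neg (by omega), if_pos (by omega)]
        rw [show 2*u+1-1 = 2*u from by omega, show 2*u+1+1+1-1 = 2*u+2 from by omega]
        rw [show 2*u+2 = 2*u+1+1 from by omega, Finset.sum_range_succ, Finset.sum_range_succ]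
        ring

lemma S_comm (a b : Nat) (l : Int) : S a b l = S b a l := by
  rw [S, Finset.sum_comm]
  apply Finset.sum_congr rfl
  intro j _
  apply Finset.sum_congr rfl
  intro i _
  rw [Nat.xor_comm]

lemma S_zero_left (b : Nat) (l : Int) : S 0 b l = 0 := by simp [S]

lemma S_zero_right (a : Nat) (l : Int) : S a 0 l = 0 := by simp [S]

lemma G_mul_split (e t : Nat) (l : Int) :
    ∑ q ∈ Finset.range t, G (2^e) (l - ((2^e * q : Nat) : Int)) = G (2^e * t) l := by
  rw [G, sum_range_mul]
  apply Finset.sum_congr rfl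
  intro q _
  rw [G]
  apply Finset.sum_congr rfl
  intro r _
  push_cast
  congr 1
  ring

-- ---- main decomposition lemmas ----

lemma S_split (e M N : Nat) (l : Int) (hMk : 2^e ≤ M) (hM2 : M < 2^(e+1)) (hMN : M ≤ N) :
    S M N l =
      ((2^e : Nat) : Int) * G (2^e * (N / 2^e)) l
      + ((N - 2^e * (N / 2^e) : Nat) : Int) * G (2^e) (l - ((2^e * (N / 2^e) : Nat) : Int))
      + ((M - 2^e : Nat) : Int) *
          (if (N / 2^e) % 2 = 0 then G (2^e * (N / 2^e)) l
           else G (2^e * (N / 2^e - 1)) l + G (2^e) (l - ((2^e * (N / 2^e) : Nat) : Int)))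
      + S (M - 2^e) (N - 2^e * (N / 2^e)) (l - ((2^e * (1 ^^^ N / 2^e) : Nat) : Int)) := by
  have hkpos : 0 < 2^e := Nat.two_pow_pos e
  have hdm : 2^e * (N / 2^e) + N % 2^e = N := Nat.div_add_mod N (2^e)
  have hmod : N % 2^e < 2^e := Nat.mod_lt N hkpos
  have htpos : 1 ≤ N / 2^e := (Nat.one_le_div_iff hkpos).mpr (le_trans hMk hMN)
  have hW : 2^e * (N / 2^e) ≤ N := by omega
  have hRk : N - 2^e * (N / 2^e) < 2^e := by omega
  have h2k : 2^(e+1) = 2 * 2^e := by rw [pow_succ]; ring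
  have hMk' : M - 2^e < 2^e := by omega
  have hrows : Finset.range M = Finset.range (2^e + (M - 2^e)) := by congr 1; omega
  have hcols : Finset.range N = Finset.range (2^e * (N / 2^e) + (N - 2^e * (N / 2^e))) := by
    congr 1; omega
  rw [S, hrows, Finset.sum_range_add]
  simp only [hcols, Finset.sum_range_add]
  rw [Finset.sum_add_distrib, Finset.sum_add_distrib]
  have hT1 : ∑ i ∈ Finset.range (2^e), ∑ j ∈ Finset.range (2^e * (N / 2^e)),
      max 0 (((i ^^^ j : Nat) : Int) - l) = ((2^e : Nat) : Int) * G (2^e * (N / 2^e)) l := by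
    have step : ∀ i ∈ Finset.range (2^e), (∑ j ∈ Finset.range (2^e * (N / 2^e)),
        max 0 (((i ^^^ j : Nat) : Int) - l)) = G (2^e * (N / 2^e)) l := by
      intro i hi
      rw [G]
      exact row_block e (N / 2^e) i (Finset.mem_range.mp hi) (fun v => max 0 ((v : Int) - l))
    rw [Finset.sum_congr rfl step, Finset.sum_const, Finset.card_range, nsmul_eq_mul]
  have hT2 : ∑ i ∈ Finset.range (2^e), ∑ x ∈ Finset.range (N - 2^e * (N / 2^e)),
      max 0 (((i ^^^ (2^e * (N / 2^e) + x) : Nat) : Int) - l)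
      = ((N - 2^e * (N / 2^e) : Nat) : Int) * G (2^e) (l - ((2^e * (N / 2^e) : Nat) : Int)) := by
    rw [Finset.sum_comm]
    have step : ∀ x ∈ Finset.range (N - 2^e * (N / 2^e)), (∑ i ∈ Finset.range (2^e),
        max 0 (((i ^^^ (2^e * (N / 2^e) + x) : Nat) : Int) - l))
        = G (2^e) (l - ((2^e * (N / 2^e) : Nat) : Int)) := by
      intro x hx
      have hx' : x < 2^e := lt_trans (Finset.mem_range.mp hx) (lt_of_le_of_lt (Nat.le_refl _) hRk)
      have cell : ∀ i ∈ Finset.range (2^e),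
          max 0 (((i ^^^ (2^e * (N / 2^e) + x) : Nat) : Int) - l)
          = (fun v => max 0 (((2^e * (N / 2^e) + v : Nat) : Int) - l)) (x ^^^ i) := by
        intro i hi
        have hi' := Finset.mem_range.mp hi
        have h := xor_block e 0 i (N / 2^e) x hi' hx'
        simp only [Nat.mul_zero, Nat.zero_add, Nat.zero_xor] at h
        simp only [h, Nat.xor_comm i x]
      rw [Finset.sum_congr rfl cell,
        sum_xor e x hx' (fun v => max 0 (((2^e * (N / 2^e) + v : Nat) : Int) - l))]
      rw [G]
      apply Finset.sum_congr rfl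
      intro v _
      push_cast
      congr 1
      ring
    rw [Finset.sum_congr rfl step, Finset.sum_const, Finset.card_range, nsmul_eq_mul]
  have hT3 : ∑ x ∈ Finset.range (M - 2^e), ∑ j ∈ Finset.range (2^e * (N / 2^e)),
      max 0 ((((2^e + x) ^^^ j : Nat) : Int) - l)
      = ((M - 2^e : Nat) : Int) *
          (if (N / 2^e) % 2 = 0 then G (2^e * (N / 2^e)) l
           else G (2^e * (N / 2^e - 1)) l + G (2^e) (l - ((2^e * (N / 2^e) : Nat) : Int))) := by
    have step : ∀ x ∈ Finset.range (M - 2^e), (∑ j ∈ Finset.range (2^e * (N / 2^e)),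
        max 0 ((((2^e + x) ^^^ j : Nat) : Int) - l))
        = (if (N / 2^e) % 2 = 0 then G (2^e * (N / 2^e)) l
           else G (2^e * (N / 2^e - 1)) l + G (2^e) (l - ((2^e * (N / 2^e) : Nat) : Int))) := by
      intro x hx
      have hx' : x < 2^e := lt_of_lt_of_le (Finset.mem_range.mp hx) (le_of_lt hMk')
      rw [sum_range_mul (2^e) (N / 2^e) (fun j => max 0 ((((2^e + x) ^^^ j : Nat) : Int) - l))]
      have inner : ∀ q ∈ Finset.range (N / 2^e), (∑ r ∈ Finset.range (2^e),
          max 0 ((((2^e + x) ^^^ (2^e * q + r) : Nat) : Int) - l))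
          = (fun q' => G (2^e) (l - ((2^e * q' : Nat) : Int))) (1 ^^^ q) := by
        intro q _
        have cell : ∀ r ∈ Finset.range (2^e),
            max 0 ((((2^e + x) ^^^ (2^e * q + r) : Nat) : Int) - l)
            = (fun v => max 0 (((2^e * (1 ^^^ q) + v : Nat) : Int) - l)) (x ^^^ r) := by
          intro r hr
          have hr' := Finset.mem_range.mp hr
          have h := xor_block e 1 x q r hx' hr'
          simp only [Nat.mul_one] at h
          simp only [h]
        rw [Finset.sum_congr rfl cell,
          sum_xor e x hx' (fun v => max 0 (((2^e * (1 ^^^ q) + v : Nat) : Int) - l))]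
        simp only []
        rw [G]
        apply Finset.sum_congr rfl
        intro v _
        push_cast
        congr 1
        ring
      rw [Finset.sum_congr rfl inner,
        sum_xor_one (fun q' => G (2^e) (l - ((2^e * q' : Nat) : Int))) (N / 2^e)]
      by_cases hp : (N / 2^e) % 2 = 0
      · rw [if_pos hp, if_pos hp, G_mul_split]
      · rw [if_neg hp, if_neg hp, G_mul_split]
    rw [Finset.sum_congr rfl step, Finset.sum_const, Finset.card_range, nsmul_eq_mul]
  have hT4 : ∑ x ∈ Finset.range (M - 2^e), ∑ y ∈ Finset.range (N - 2^e * (N / 2^e)),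
      max 0 ((((2^e + x) ^^^ (2^e * (N / 2^e) + y) : Nat) : Int) - l)
      = S (M - 2^e) (N - 2^e * (N / 2^e)) (l - ((2^e * (1 ^^^ N / 2^e) : Nat) : Int)) := by
    rw [S]
    apply Finset.sum_congr rfl
    intro x hx
    apply Finset.sum_congr rfl
    intro y hy
    have hx' : x < 2^e := lt_of_lt_of_le (Finset.mem_range.mp hx) (le_of_lt hMk')
    have hy' : y < 2^e := lt_trans (Finset.mem_range.mp hy) hRk
    have h := xor_block e 1 x (N / 2^e) y hx' hy'
    simp only [Nat.mul_one] at h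
    rw [h]
    push_cast
    congr 1
    ring
  rw [hT1, hT2, hT3, hT4]
  ring

lemma S_quad (e M N : Nat) (l : Int) (hmax : 2^e ≤ max M N) (hlt : max M N < 2^(e+1))
    (hM : 1 ≤ M) (hN : 1 ≤ N) :
    S M N l =
      ((min M (2^e) * min N (2^e) / 2^e : Nat) : Int) * G (2^e) l
      + S (min M (2^e)) (N - min N (2^e)) (l - ((2^e : Nat) : Int))
      + S (M - min M (2^e)) (min N (2^e)) (l - ((2^e : Nat) : Int))
      + S (M - min M (2^e)) (N - min N (2^e)) l := by
  have hkpos : 0 < 2^e := Nat.two_pow_pos e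
  have h2k : 2^(e+1) = 2 * 2^e := by rw [pow_succ]; ring
  have hM2k : M < 2 * 2^e := by
    have : M ≤ max M N := le_max_left M N
    omega
  have hN2k : N < 2 * 2^e := by
    have : N ≤ max M N := le_max_right M N
    omega
  have hm1M : min M (2^e) ≤ M := Nat.min_le_left _ _
  have hn1N : min N (2^e) ≤ N := Nat.min_le_left _ _
  have hm1k : min M (2^e) ≤ 2^e := Nat.min_le_right _ _
  have hn1k : min N (2^e) ≤ 2^e := Nat.min_le_right _ _
  have hmaxMN : 2^e ≤ M ∨ 2^e ≤ N := by
    rcases le_total M N with h | h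
    · right; rwa [max_eq_right h] at hmax
    · left; rwa [max_eq_left h] at hmax
  have hrows : Finset.range M = Finset.range (min M (2^e) + (M - min M (2^e))) := by
    congr 1; omega
  have hcols : Finset.range N = Finset.range (min N (2^e) + (N - min N (2^e))) := by
    congr 1; omega
  rw [S, hrows, Finset.sum_range_add]
  simp only [hcols, Finset.sum_range_add]
  rw [Finset.sum_add_distrib, Finset.sum_add_distrib]
  have hQ11 : ∑ i ∈ Finset.range (min M (2^e)), ∑ j ∈ Finset.range (min N (2^e)),
      max 0 (((i ^^^ j : Nat) : Int) - l)
      = ((min M (2^e) * min N (2^e) / 2^e : Nat) : Int) * G (2^e) l := by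
    by_cases hN' : 2^e ≤ N
    · have hn1 : min N (2^e) = 2^e := min_eq_right hN'
      rw [hn1]
      have step : ∀ i ∈ Finset.range (min M (2^e)), (∑ j ∈ Finset.range (2^e),
          max 0 (((i ^^^ j : Nat) : Int) - l)) = G (2^e) l := by
        intro i hi
        have hi' : i < 2^e := lt_of_lt_of_le (Finset.mem_range.mp hi) hm1k
        rw [G]
        exact sum_xor e i hi' (fun v => max 0 ((v : Int) - l))
      rw [Finset.sum_congr rfl step, Finset.sum_const, Finset.card_range, nsmul_eq_mul]
      rw [Nat.mul_div_cancel _ hkpos]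
    · have hN'' : N < 2^e := by omega
      have hn1 : min N (2^e) = N := min_eq_left (le_of_lt hN'')
      have hMk : 2^e ≤ M := by omega
      have hm1 : min M (2^e) = 2^e := min_eq_right hMk
      rw [Finset.sum_comm]
      have step : ∀ j ∈ Finset.range (min N (2^e)), (∑ i ∈ Finset.range (min M (2^e)),
          max 0 (((i ^^^ j : Nat) : Int) - l)) = G (2^e) l := by
        intro j hj
        have hj' : j < 2^e := lt_of_lt_of_le (Finset.mem_range.mp hj) hn1k
        rw [hm1, G]
        have cell : ∀ i ∈ Finset.range (2^e),
            max 0 (((i ^^^ j : Nat) : Int) - l)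
            = (fun v => max 0 ((v : Int) - l)) (j ^^^ i) := by
          intro i _
          simp only [Nat.xor_comm i j]
        rw [Finset.sum_congr rfl cell]
        exact sum_xor e j hj' (fun v => max 0 ((v : Int) - l))
      rw [Finset.sum_congr rfl step, Finset.sum_const, Finset.card_range, nsmul_eq_mul]
      rw [hm1, Nat.mul_div_cancel_left _ hkpos]
  have hQ12 : ∑ i ∈ Finset.range (min M (2^e)), ∑ x ∈ Finset.range (N - min N (2^e)),
      max 0 (((i ^^^ (min N (2^e) + x) : Nat) : Int) - l)
      = S (min M (2^e)) (N - min N (2^e)) (l - ((2^e : Nat) : Int)) := by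
    rcases Nat.eq_zero_or_pos (N - min N (2^e)) with h0 | hpos
    · rw [h0]
      simp [S]
    · have hn1 : min N (2^e) = 2^e := by
        rcases le_total N (2^e) with h | h
        · rw [min_eq_left h] at hpos ⊢; omega
        · exact min_eq_right h
      rw [S]
      apply Finset.sum_congr rfl
      intro i hi
      apply Finset.sum_congr rfl
      intro x hx
      have hi' : i < 2^e := lt_of_lt_of_le (Finset.mem_range.mp hi) hm1k
      have hx' : x < 2^e := by
        have := Finset.mem_range.mp hx
        omega
      have h := xor_block e 0 i 1 x hi' hx'
      simp only [Nat.mul_zero, Nat.zero_add, Nat.zero_xor, Nat.mul_one] at h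
      rw [hn1, h]
      push_cast
      congr 1
      ring
  have hQ21 : ∑ x ∈ Finset.range (M - min M (2^e)), ∑ j ∈ Finset.range (min N (2^e)),
      max 0 ((((min M (2^e) + x) ^^^ j : Nat) : Int) - l)
      = S (M - min M (2^e)) (min N (2^e)) (l - ((2^e : Nat) : Int)) := by
    rcases Nat.eq_zero_or_pos (M - min M (2^e)) with h0 | hpos
    · rw [h0]
      simp [S]
    · have hm1 : min M (2^e) = 2^e := by
        rcases le_total M (2^e) with h | h
        · rw [min_eq_left h] at hpos ⊢; omega
        · exact min_eq_right h
      rw [S]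
      apply Finset.sum_congr rfl
      intro x hx
      apply Finset.sum_congr rfl
      intro j hj
      have hj' : j < 2^e := lt_of_lt_of_le (Finset.mem_range.mp hj) hn1k
      have hx' : x < 2^e := by
        have := Finset.mem_range.mp hx
        omega
      have h := xor_block e 1 x 0 j hx' hj'
      simp only [Nat.mul_zero, Nat.zero_add, Nat.mul_one, Nat.xor_zero] at h
      rw [hm1, h]
      push_cast
      congr 1
      ring
  have hQ22 : ∑ x ∈ Finset.range (M - min M (2^e)), ∑ y ∈ Finset.range (N - min N (2^e)),
      max 0 ((((min M (2^e) + x) ^^^ (min N (2^e) + y) : Nat) : Int) - l)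
      = S (M - min M (2^e)) (N - min N (2^e)) l := by
    rcases Nat.eq_zero_or_pos (M - min M (2^e)) with h0 | hposM
    · rw [h0]
      simp [S]
    rcases Nat.eq_zero_or_pos (N - min N (2^e)) with h0 | hposN
    · rw [h0]
      simp [S]
    have hm1 : min M (2^e) = 2^e := by
      rcases le_total M (2^e) with h | h
      · rw [min_eq_left h] at hposM ⊢; omega
      · exact min_eq_right h
    have hn1 : min N (2^e) = 2^e := by
      rcases le_total N (2^e) with h | h
      · rw [min_eq_left h] at hposN ⊢; omega
      · exact min_eq_right h
    rw [S]
    apply Finset.sum_congr rfl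
    intro x hx
    apply Finset.sum_congr rfl
    intro y hy
    have hx' : x < 2^e := by
      have := Finset.mem_range.mp hx
      omega
    have hy' : y < 2^e := by
      have := Finset.mem_range.mp hy
      omega
    have h := xor_block e 1 x 1 y hx' hy'
    simp only [Nat.mul_one, Nat.xor_self, Nat.mul_zero, Nat.zero_add] at h
    rw [hm1, hn1, h]
  rw [hQ11, hQ12, hQ21, hQ22]
  ring

-- ---- A's port computes S ----

lemma A_main : ∀ (fuel : Nat) (m n l : Int), 0 ≤ m → 0 ≤ n → (m + n).toNat < fuel →
    auxA fuel m n l = S m.toNat n.toNat l := by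
  intro fuel
  induction fuel with
  | zero => intro m n l _ _ h; omega
  | succ fuel ih =>
    have core : ∀ (m n l : Int), 0 ≤ m → m ≤ n → (m + n).toNat < fuel + 1 →
        auxA (fuel+1) m n l = S m.toNat n.toNat l := by
      intro m n l hm hmn hf
      have hn : 0 ≤ n := le_trans hm hmn
      simp only [auxA]
      simp only [if_pos hmn]
      by_cases h0 : m ≤ 0
      · rw [if_pos h0]
        have : m.toNat = 0 := by omega
        rw [this, S_zero_left]
      · rw [if_neg h0]
        set M := m.toNat with hMdef
        set N := n.toNat with hNdef
        set E := Nat.log2 M with hEdef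
        have hmM : m = (M : Int) := by omega
        have hnN : n = (N : Int) := by omega
        have hM1 : 1 ≤ M := by omega
        have hMN : M ≤ N := by omega
        have hkM : 2 ^ E ≤ M := Nat.log2_self_le (by omega)
        have hM2 : M < 2 ^ (E + 1) := Nat.lt_log2_self
        have hkpos : 0 < 2 ^ E := Nat.two_pow_pos E
        have hdm : 2^E * (N / 2^E) + N % 2^E = N := Nat.div_add_mod N (2^E)
        have hmod : N % 2^E < 2^E := Nat.mod_lt N hkpos
        have htpos : 1 ≤ N / 2^E := (Nat.one_le_div_iff hkpos).mpr (le_trans hkM hMN)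
        have hWpos : 0 < 2^E * (N / 2^E) := Nat.mul_pos hkpos htpos
        have hWN : 2^E * (N / 2^E) ≤ N := by omega
        rw [hmM, hnN]
        have hpow : ((2:Int) ^ E) = ((2 ^ E : Nat) : Int) := by push_cast; ring
        rw [hpow, PySem.Int.floordiv_natCast]
        rw [show ((N / 2^E : Nat) : Int) * ((2 ^ E : Nat) : Int)
              = ((2^E * (N / 2^E) : Nat) : Int) from by push_cast; ring]
        rw [PySem.Int.floordiv_natCast, Nat.mul_div_cancel_left _ hkpos]
        rw [show (2:Int) = ((2:Nat) : Int) from by norm_num, PySem.Int.mod_natCast]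
        simp only [Nat.cast_eq_zero, Nat.cast_lt]
        rw [rowsum_eq (((2^E * (N / 2^E) : Nat)) : Int) 0 l (by positivity)]
        rw [rowsum_eq (((2^E : Nat)) : Int) ((N / 2^E : Nat) : Int) l (by positivity)]
        simp only [Int.toNat_natCast, mul_zero, sub_zero]
        rw [show l - ((2^E : Nat) : Int) * ((N / 2^E : Nat) : Int)
              = l - ((2^E * (N / 2^E) : Nat) : Int) from by push_cast; ring]
        rw [show ((N : Int)) - ((2^E * (N / 2^E) : Nat) : Int)
              = ((N - 2^E * (N / 2^E) : Nat) : Int) from by rw [← Nat.cast_sub hWN]]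
        by_cases hlt : 2^E < M
        · rw [if_pos hlt]
          rw [show ((M : Int)) - ((2^E : Nat) : Int) = ((M - 2^E : Nat) : Int) from by
                rw [← Nat.cast_sub (le_of_lt hlt)]]
          rw [show ((2^E * (N / 2^E) : Nat) : Int) - ((2^E : Nat) : Int)
                = ((2^E * (N / 2^E - 1) : Nat) : Int) from by
                rw [← Nat.cast_sub (Nat.le_mul_of_pos_right _ htpos), Nat.mul_sub, Nat.mul_one]]
          rw [rowsum_eq (((2^E * (N / 2^E - 1) : Nat)) : Int) 0 l (by positivity)]
          simp only [Int.toNat_natCast, mul_zero, sub_zero]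
          by_cases hp : (N / 2^E) % 2 = 0
          · rw [if_pos hp, if_pos hp]
            have hfac : ((N / 2^E : Nat) : Int) + 1 = ((1 ^^^ N / 2^E : Nat) : Int) := by
              rw [xor_one (N / 2^E), if_pos hp]
              push_cast
              ring_nf
            rw [hfac]
            rw [show ((2^E : Nat) : Int) * ((1 ^^^ N / 2^E : Nat) : Int)
                  = ((2^E * (1 ^^^ N / 2^E) : Nat) : Int) from by push_cast; ring]
            rw [ih ((M - 2^E : Nat) : Int) ((N - 2^E * (N / 2^E) : Nat) : Int)
                  (l - ((2^E * (1 ^^^ N / 2^E) : Nat) : Int)) (by positivity) (by positivity)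
                  (by omega)]
            simp only [Int.toNat_natCast]
            rw [S_split E M N l hkM hM2 hMN, if_pos hp]
          · rw [if_neg hp, if_neg hp]
            have hfac : ((N / 2^E : Nat) : Int) - 1 = ((1 ^^^ N / 2^E : Nat) : Int) := by
              rw [xor_one (N / 2^E), if_neg hp]
              rw [Nat.cast_sub htpos]
              norm_num
            rw [hfac]
            rw [show ((2^E : Nat) : Int) * ((1 ^^^ N / 2^E : Nat) : Int)
                  = ((2^E * (1 ^^^ N / 2^E) : Nat) : Int) from by push_cast; ring]
            rw [ih ((M - 2^E : Nat) : Int) ((N - 2^E * (N / 2^E) : Nat) : Int)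
                  (l - ((2^E * (1 ^^^ N / 2^E) : Nat) : Int)) (by positivity) (by positivity)
                  (by omega)]
            simp only [Int.toNat_natCast]
            rw [S_split E M N l hkM hM2 hMN, if_neg hp]
        · rw [if_neg hlt]
          have hMk2 : M = 2^E := by omega
          rw [S_split E M N l hkM hM2 hMN]
          rw [show M - 2^E = 0 from by omega]
          rw [S_zero_left]
          simp only [Nat.cast_zero, zero_mul]
          ring
    intro m n l hm hn hf
    by_cases hmn : m ≤ n
    · exact core m n l hm hmn hf
    · push_neg at hmn
      have hswap : auxA (fuel+1) m n l = auxA (fuel+1) n m l := by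
        simp only [auxA]
        rw [if_neg (not_le.mpr hmn), if_neg (not_le.mpr hmn),
            if_pos (le_of_lt hmn), if_pos (le_of_lt hmn)]
      rw [hswap, core n m l hn (le_of_lt hmn) (by omega), S_comm]

-- ---- B's port computes S ----

lemma B_main : ∀ (fuel : Nat) (m n l : Int), 0 ≤ m → 0 ≤ n → (m + n).toNat < fuel →
    auxB fuel m n l = S m.toNat n.toNat l := by
  intro fuel
  induction fuel with
  | zero => intro m n l _ _ h; omega
  | succ fuel ih =>
    intro m n l hm hn hf
    simp only [auxB]
    by_cases h0 : m ≤ 0 ∨ n ≤ 0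
    · rw [if_pos h0]
      rcases h0 with h0 | h0
      · rw [show m.toNat = 0 from by omega, S_zero_left]
      · rw [show n.toNat = 0 from by omega, S_zero_right]
    · rw [if_neg h0]
      push_neg at h0
      set M := m.toNat with hMdef
      set N := n.toNat with hNdef
      have hmM : m = (M : Int) := by omega
      have hnN : n = (N : Int) := by omega
      have hM1 : 1 ≤ M := by omega
      have hN1 : 1 ≤ N := by omega
      rw [hmM, hnN]
      rw [show max ((M : Int)) ((N : Int)) = ((max M N : Nat) : Int) from by
            rw [Nat.cast_max]]
      have hmaxpos : 1 ≤ max M N := le_trans hM1 (le_max_left M N)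
      set bl := PySem.Int.bitLength ((max M N : Nat) : Int) with hbl
      have hub : max M N < 2 ^ bl := by
        have h1 := PySem.Int.lt_two_pow_bitLength ((max M N : Nat) : Int)
        rwa [Int.natAbs_natCast] at h1
      have hlb : 2 ^ (bl - 1) ≤ max M N := by
        have h2 := PySem.Int.two_pow_bitLength_le ((max M N : Nat) : Int)
          (Nat.cast_ne_zero.mpr (by omega))
        rwa [Int.natAbs_natCast] at h2
      have hkpos : 0 < 2 ^ (bl - 1) := Nat.two_pow_pos _
      have hbl1 : 1 ≤ bl := by
        by_contra hc
        have hbl0 : bl = 0 := by omega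
        rw [hbl0, pow_zero] at hub
        omega
      have hub' : max M N < 2 ^ (bl - 1 + 1) := by
        rwa [Nat.sub_add_cancel hbl1]
      have hK : (1 <<< (bl - 1) : Nat) = 2 ^ (bl - 1) := Nat.one_shiftLeft _
      rw [hK]
      rw [← Nat.cast_min, ← Nat.cast_min]
      rw [show ((min M (2^(bl-1)) : Nat) : Int) * ((min N (2^(bl-1)) : Nat) : Int)
            = ((min M (2^(bl-1)) * min N (2^(bl-1)) : Nat) : Int) from by push_cast; ring]
      rw [PySem.Int.floordiv_natCast]
      rw [clampsum_eq (((2 ^ (bl - 1) : Nat)) : Int) l (by positivity)]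
      simp only [Int.toNat_natCast]
      rw [show ((M : Int)) - ((min M (2^(bl-1)) : Nat) : Int) = ((M - min M (2^(bl-1)) : Nat) : Int) from by
            rw [← Nat.cast_sub (Nat.min_le_left _ _)]]
      rw [show ((N : Int)) - ((min N (2^(bl-1)) : Nat) : Int) = ((N - min N (2^(bl-1)) : Nat) : Int) from by
            rw [← Nat.cast_sub (Nat.min_le_left _ _)]]
      have hm1pos : 1 ≤ min M (2^(bl-1)) := le_min hM1 hkpos
      have hn1pos : 1 ≤ min N (2^(bl-1)) := le_min hN1 hkpos
      have hm1M : min M (2^(bl-1)) ≤ M := Nat.min_le_left _ _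
      have hn1N : min N (2^(bl-1)) ≤ N := Nat.min_le_left _ _
      rw [ih ((min M (2^(bl-1)) : Nat) : Int) ((N - min N (2^(bl-1)) : Nat) : Int)
            (l - ((2 ^ (bl - 1) : Nat) : Int)) (by positivity) (by positivity) (by omega)]
      rw [ih ((M - min M (2^(bl-1)) : Nat) : Int) ((min N (2^(bl-1)) : Nat) : Int)
            (l - ((2 ^ (bl - 1) : Nat) : Int)) (by positivity) (by positivity) (by omega)]
      rw [ih ((M - min M (2^(bl-1)) : Nat) : Int) ((N - min N (2^(bl-1)) : Nat) : Int)
            l (by positivity) (by positivity) (by omega)]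
      simp only [Int.toNat_natCast]
      rw [S_quad (bl - 1) M N l hlb hub' hM1 hN1]

-- ===== VERDICT (by name: the statement is the Claim_ definition above) =====
theorem solve_spec : Claim_equal_solve := by
  intro m n l _ hpre
  rcases hpre with ⟨hm, hn⟩
  unfold Spec_solve solve solve_alt
  rw [A_main _ m n l hm hn (by omega), B_main _ m n l hm hn (by omega)]
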